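-- pv_equiv track=rewrite | github.com/momo4826/CS61A | week5/cats/cats.py | correct_counter
-- ===== SOURCE A (Python) =====
-- def correct_counter(typed_words, source_words):
--     if len(source_words) == 0:
--         return 0
--     elif len(typed_words) == 0:
--         return 0
--     else:
--         if source_words[0] == typed_words[0]:
--             return 1 + correct_counter(typed_words[1:], source_words[1:])
--         else:
--             return correct_counter(typed_words[1:], source_words[1:])
-- ===== SOURCE B (Python) =====
-- def correct_counter(typed_words, source_words):
--     count = 0
--     for t, s in zip(typed_words, source_words):
--         if t == s:
--             count += 1
--     return count
-- ===== Notes on version B (the rewrite author's own statement) =====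
-- stated objective: simpler
-- what changed: Replaced the recursion with repeated list slicing by a single iterative zip loop maintaining a running counter.
import Mathlib
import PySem

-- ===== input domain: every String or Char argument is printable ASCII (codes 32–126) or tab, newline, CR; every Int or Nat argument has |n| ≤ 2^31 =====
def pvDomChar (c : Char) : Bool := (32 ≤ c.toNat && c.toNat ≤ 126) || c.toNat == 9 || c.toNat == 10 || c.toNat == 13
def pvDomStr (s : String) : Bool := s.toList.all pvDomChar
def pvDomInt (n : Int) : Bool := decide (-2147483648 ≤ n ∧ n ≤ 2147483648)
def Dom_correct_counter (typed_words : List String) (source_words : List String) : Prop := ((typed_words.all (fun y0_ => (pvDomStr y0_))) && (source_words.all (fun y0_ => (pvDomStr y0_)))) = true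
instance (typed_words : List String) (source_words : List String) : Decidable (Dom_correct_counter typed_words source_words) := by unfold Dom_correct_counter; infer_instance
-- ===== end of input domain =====

-- B replaces A's recursion over slices by a single iterative zip loop with a running counter (simpler).


-- ===== PORT A =====
-- literal transliteration of A: base cases in the same order; source_words[0] == typed_words[0]
-- is the head comparison; the [1:] slices are the tails.
def correct_counter (typed_words : List String) (source_words : List String) : Int :=
  match source_words, typed_words with
  | [], _ => 0
  | _, [] => 0
  | sw :: srest, tw :: trest =>
    if sw = tw then 1 + correct_counter trest srest
    else correct_counter trest srest

-- ===== PORT B =====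
-- B: iterate over zip(typed_words, source_words) with a running counter (foldl = the for loop).
def correct_counter_alt (typed_words : List String) (source_words : List String) : Int :=
  (List.zip typed_words source_words).foldl
    (fun count p => if p.1 = p.2 then count + 1 else count) 0

-- ===== PRECONDITION & SPEC =====
def Spec_correct_counter (typed_words : List String) (source_words : List String) (out : Int) : Prop := out = correct_counter_alt typed_words source_words
instance (typed_words : List String) (source_words : List String) (out : Int) : Decidable (Spec_correct_counter typed_words source_words out) := by unfold Spec_correct_counter; infer_instance

-- ===== CLAIM (what is proved, stated in full; the proofs are below) =====
def Claim_equal_correct_counter : Prop := ∀ (typed_words : List String) (source_words : List String), Dom_correct_counter typed_words source_words → Spec_correct_counter typed_words source_words (correct_counter typed_words source_words)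

-- ===== LEMMAS AND PROOFS =====
theorem cc_foldl_shift (l : List (String × String)) (c : Int) :
    l.foldl (fun count p => if p.1 = p.2 then count + 1 else count) c
      = c + l.foldl (fun count p => if p.1 = p.2 then count + 1 else count) 0 := by
  induction l generalizing c with
  | nil => simp
  | cons x xs ih =>
    simp only [List.foldl_cons]
    rw [ih, ih (if x.1 = x.2 then 0 + 1 else 0)]
    split_ifs <;> ring

theorem cc_eq (typed_words source_words : List String) :
    correct_counter typed_words source_words = correct_counter_alt typed_words source_words := by
  induction typed_words generalizing source_words with
  | nil => cases source_words <;> simp [correct_counter, correct_counter_alt]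
  | cons t ts ih =>
    cases source_words with
    | nil => simp [correct_counter, correct_counter_alt]
    | cons s ss =>
      simp only [correct_counter, correct_counter_alt, List.zip_cons_cons, List.foldl_cons]
      rw [cc_foldl_shift]
      rw [ih ss]
      simp only [correct_counter_alt]
      split_ifs with h1 h2 h2
      · ring
      · exact (h2 h1.symm).elim
      · exact (h1 h2.symm).elim
      · ring

-- ===== VERDICT (by name: the statement is the Claim_ definition above) =====
theorem correct_counter_spec : Claim_equal_correct_counter := by
  intro t s _
  exact cc_eq t s
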